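-- pv_equiv track=rewrite | github.com/VishvaMangukiya/Basic-python-tasks | More Python Programs/diggBetweenSumOfOdd-Even.py | odd_even_digit_difference
-- ===== SOURCE A (Python) =====
-- def odd_even_digit_difference(number):
--     num_str = str(abs(number))
--     odd_sum = 0
--     even_sum = 0
--
--     for digit in num_str:
--         num = int(digit)
--         if num % 2 == 0:
--             even_sum += num
--         else:
--             odd_sum += num
--
--     return odd_sum - even_sum
-- ===== SOURCE B (Python) =====
-- def odd_even_digit_difference(number):
--     n = abs(number)
--     total = 0
--     while n:
--         d = n % 10
--         total += d if d % 2 else -d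
--         n //= 10
--     return total
-- ===== Notes on version B (the rewrite author's own statement) =====
-- stated objective: alternative
-- what changed: B extracts digits arithmetically (n % 10, n //= 10) least-significant-first with a single signed accumulator (+d for odd digits, -d for even) instead of A's string conversion with two parity-separated sums.
import Mathlib
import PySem

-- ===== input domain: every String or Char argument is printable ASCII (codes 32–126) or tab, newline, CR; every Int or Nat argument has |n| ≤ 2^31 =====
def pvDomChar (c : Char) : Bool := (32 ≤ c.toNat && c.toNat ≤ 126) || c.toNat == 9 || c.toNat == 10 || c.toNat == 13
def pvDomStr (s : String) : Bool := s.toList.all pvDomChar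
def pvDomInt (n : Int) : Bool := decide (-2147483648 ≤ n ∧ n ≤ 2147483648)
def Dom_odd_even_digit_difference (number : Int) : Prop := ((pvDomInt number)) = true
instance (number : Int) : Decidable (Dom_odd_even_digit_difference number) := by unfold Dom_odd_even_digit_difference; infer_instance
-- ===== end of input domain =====

-- B replaces A's string traversal (two parity-separated sums) with arithmetic digit
-- extraction (n % 10, n //= 10) into a single signed accumulator: same values, alternative decomposition.

-- ===== PORT A =====
-- int(digit) is ported by hand as (c.toNat : Int) - 48; this is exact here because every
-- character of str(abs(number)) is an ASCII decimal digit '0'..'9'.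
def odd_even_digit_difference (number : Int) : Int :=
  let numStr := PySem.Int.toStr |number|
  let p := numStr.toList.foldl
    (fun (p : Int × Int) c =>
      let num : Int := (c.toNat : Int) - 48
      if num % 2 = 0 then (p.1, p.2 + num) else (p.1 + num, p.2))
    ((0 : Int), (0 : Int))
  p.1 - p.2

-- ===== PORT B =====
-- the while loop of Source B, tail-recursively on n with accumulator total
def pvBLoop (n : Nat) (total : Int) : Int :=
  if h : n = 0 then total
  else pvBLoop (n / 10)
    (total + (if n % 10 % 2 ≠ 0 then ((n % 10 : Nat) : Int) else -((n % 10 : Nat) : Int)))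
termination_by n
decreasing_by exact Nat.div_lt_self (Nat.pos_of_ne_zero h) (by norm_num)

def odd_even_digit_difference_alt (number : Int) : Int :=
  pvBLoop |number|.toNat 0

-- ===== PRECONDITION & SPEC =====
def Spec_odd_even_digit_difference (number : Int) (out : Int) : Prop := out = odd_even_digit_difference_alt number
instance (number : Int) (out : Int) : Decidable (Spec_odd_even_digit_difference number out) := by unfold Spec_odd_even_digit_difference; infer_instance

-- ===== CLAIM (what is proved, stated in full; the proofs are below) =====
def Claim_equal_odd_even_digit_difference : Prop := ∀ (number : Int), Dom_odd_even_digit_difference number → Spec_odd_even_digit_difference number (odd_even_digit_difference number)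

-- ===== LEMMAS AND PROOFS =====

-- signed value of a digit: +d if odd, -d if even
def pvSval (x : Int) : Int := if x % 2 = 0 then -x else x

-- the mathematical signed digit sum of a natural number
def pvS (n : Nat) : Int :=
  if h : n = 0 then 0
  else pvSval ((n % 10 : Nat) : Int) + pvS (n / 10)
termination_by n
decreasing_by exact Nat.div_lt_self (Nat.pos_of_ne_zero h) (by norm_num)

def pvSumD (cs : List Char) : Int := (cs.map (fun c => pvSval ((c.toNat : Int) - 48))).sum

lemma pvBLoop_eq (n : Nat) (total : Int) : pvBLoop n total = total + pvS n := by
  fun_induction pvBLoop n total with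
  | case1 total => rw [pvS, dif_pos rfl]; ring
  | case2 n total h ih =>
    rw [pvS, dif_neg h]
    refine ih.trans ?_
    rw [pvSval]
    by_cases h1 : n % 10 % 2 = 0
    · rw [dif_neg (by omega : ¬ (n % 10 % 2 ≠ 0)),
          if_pos (by omega : ((n % 10 : Nat) : Int) % 2 = 0)]
      ring
    · rw [dif_pos (by omega : n % 10 % 2 ≠ 0),
          if_neg (by omega : ¬ ((n % 10 : Nat) : Int) % 2 = 0)]
      ring

lemma pvFold_eq (cs : List Char) (o e : Int) :
    (cs.foldl
      (fun (p : Int × Int) c =>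
        let num : Int := (c.toNat : Int) - 48
        if num % 2 = 0 then (p.1, p.2 + num) else (p.1 + num, p.2))
      (o, e)).1 -
    (cs.foldl
      (fun (p : Int × Int) c =>
        let num : Int := (c.toNat : Int) - 48
        if num % 2 = 0 then (p.1, p.2 + num) else (p.1 + num, p.2))
      (o, e)).2 = (o - e) + pvSumD cs := by
  induction cs generalizing o e with
  | nil => simp [pvSumD]
  | cons c cs ih =>
    simp only [List.foldl_cons, pvSumD, List.map_cons, List.sum_cons]
    by_cases h : ((c.toNat : Int) - 48) % 2 = 0 <;>
      [skip; skip] <;> simp only [h, ite_true, ite_false] <;> rw [ih] <;>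
      simp only [pvSumD, pvSval, h, ite_true, ite_false] <;> ring

lemma pvDigitChar_val (r : Nat) (h : r < 10) :
    ((Nat.digitChar r).toNat : Int) - 48 = (r : Int) := by
  interval_cases r <;> decide

lemma pvToDigitsCore_sum (f : Nat) : ∀ (n : Nat) (ds : List Char), n < f →
    pvSumD (Nat.toDigitsCore 10 f n ds) = pvS n + pvSumD ds := by
  induction f with
  | zero => intro n ds h; omega
  | succ f ih =>
    intro n ds h
    rw [show Nat.toDigitsCore 10 (f+1) n ds =
      if n / 10 = 0 then (n % 10).digitChar :: ds
      else Nat.toDigitsCore 10 f (n / 10) ((n % 10).digitChar :: ds) from rfl]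
    by_cases h0 : n / 10 = 0
    · rw [if_pos h0]
      have : pvSumD ((n % 10).digitChar :: ds) = pvSval ((n % 10 : Nat) : Int) + pvSumD ds := by
        simp [pvSumD, pvDigitChar_val _ (Nat.mod_lt _ (by norm_num))]
      rw [this]
      by_cases hn : n = 0
      · subst hn; rw [pvS]; simp [pvSval]
      · rw [pvS, dif_neg hn, h0, pvS]; simp
    · rw [if_neg h0]
      have hn : n ≠ 0 := by intro hn; subst hn; simp at h0
      have hlt : n / 10 < f :=
        Nat.lt_of_lt_of_le (Nat.div_lt_self (Nat.pos_of_ne_zero hn) (by norm_num))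
          (Nat.le_of_lt_succ h)
      rw [ih (n / 10) _ hlt]
      have : pvSumD ((n % 10).digitChar :: ds) = pvSval ((n % 10 : Nat) : Int) + pvSumD ds := by
        simp [pvSumD, pvDigitChar_val _ (Nat.mod_lt _ (by norm_num))]
      rw [this, show pvS n = pvSval ((n % 10 : Nat) : Int) + pvS (n / 10) from by
        rw [pvS, dif_neg hn]]
      ring

lemma pvA_eq (number : Int) :
    odd_even_digit_difference number = pvS |number|.toNat := by
  unfold odd_even_digit_difference
  simp only [PySem.Int.toList_toStr]
  have habs : ¬ (|number| < 0) := not_lt.mpr (abs_nonneg number)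
  rw [PySem.Int.toChars, if_neg habs, Nat.toDigits, pvFold_eq]
  rw [pvToDigitsCore_sum _ _ _ (Nat.lt_succ_self _)]
  simp [pvSumD]

-- ===== VERDICT (by name: the statement is the Claim_ definition above) =====
theorem odd_even_digit_difference_spec : Claim_equal_odd_even_digit_difference := by
  intro number _
  unfold Spec_odd_even_digit_difference odd_even_digit_difference_alt
  rw [pvBLoop_eq, pvA_eq]; ring
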